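-- pv_equiv track=rewrite | github.com/arshdeepbansal12/library-management-system | return_book.py | calculate_fine
-- ===== SOURCE A (Python) =====
-- import math
--
-- def calculate_fine(late_days):
--     """Calculates progressive fine based on weeks late."""
--     fine = 0
--     remaining_days = late_days
--     week = 1
--
--     while remaining_days > 0:
--         # Process fine week by week
--         days_in_current_week = min(remaining_days, 7)
--
--         # Factorial logic: wk 1=10, wk 2=20, wk 3=60, wk 4=240, etc.
--         daily_rate = 10 * math.factorial(week)
--
--         fine += days_in_current_week * daily_rate
--         remaining_days -= days_in_current_week
--         week += 1
--
--     return fine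
-- ===== SOURCE B (Python) =====
-- import math
--
-- def calculate_fine(late_days):
--     """Calculates progressive fine by summing the daily rate of each late day."""
--     fine = 0
--     for d in range(1, late_days + 1):
--         week = (d - 1) // 7 + 1
--         fine += 10 * math.factorial(week)
--     return fine
-- ===== Notes on version B (the rewrite author's own statement) =====
-- stated objective: simpler
-- what changed: Replaced the while-loop over weekly chunks (min/remaining-days bookkeeping with three mutable state variables) with a single flat for-loop over the individual late days, computing each day's week number directly and summing its daily rate.
import Mathlib
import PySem

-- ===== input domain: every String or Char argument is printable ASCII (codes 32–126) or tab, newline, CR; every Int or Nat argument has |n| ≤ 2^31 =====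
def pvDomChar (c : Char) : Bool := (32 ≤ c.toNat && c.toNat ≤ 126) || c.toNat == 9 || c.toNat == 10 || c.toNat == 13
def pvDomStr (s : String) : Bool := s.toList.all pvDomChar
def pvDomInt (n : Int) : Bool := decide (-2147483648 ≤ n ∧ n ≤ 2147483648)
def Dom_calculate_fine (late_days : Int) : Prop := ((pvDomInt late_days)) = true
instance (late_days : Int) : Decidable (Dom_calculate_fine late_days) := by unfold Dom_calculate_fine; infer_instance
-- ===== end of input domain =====

-- B replaces A's weekly-chunk while loop (min/remaining-days bookkeeping) with a flat
-- per-day for loop computing each day's week directly; objective: simpler.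

-- ===== PORT A =====
-- the while loop of A, step for step: state (remaining_days, week, fine)
def calculate_fine_loop (remaining_days : Int) (week : Nat) (fine : Int) : Int :=
  if h : remaining_days > 0 then
    let days_in_current_week := min remaining_days 7
    let daily_rate : Int := 10 * (Nat.factorial week : Int)
    calculate_fine_loop (remaining_days - days_in_current_week) (week + 1)
      (fine + days_in_current_week * daily_rate)
  else fine
termination_by remaining_days.toNat
decreasing_by
  simp only [Int.lt_iff_add_one_le] at h
  omega

def calculate_fine (late_days : Int) : Int :=
  calculate_fine_loop late_days 1 0

-- ===== PORT B =====
def calculate_fine_alt (late_days : Int) : Int :=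
  (PySem.List.pyRange 1 (late_days + 1) 1).foldl
    (fun fine d =>
      let week := PySem.Int.floordiv (d - 1) 7 + 1
      fine + 10 * (Nat.factorial week.toNat : Int)) 0

-- ===== PRECONDITION & SPEC =====
def Spec_calculate_fine (late_days : Int) (out : Int) : Prop := out = calculate_fine_alt late_days
instance (late_days : Int) (out : Int) : Decidable (Spec_calculate_fine late_days out) := by unfold Spec_calculate_fine; infer_instance

-- ===== CLAIM (what is proved, stated in full; the proofs are below) =====
def Claim_equal_calculate_fine : Prop := ∀ (late_days : Int), Dom_calculate_fine late_days → Spec_calculate_fine late_days (calculate_fine late_days)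

-- ===== LEMMAS AND PROOFS =====

-- mathematical middle ground: the per-day sum, over Nat-indexed days k = d - 1
def fineSum (n : Nat) (w : Nat) : Int :=
  ((List.range n).map (fun k => 10 * (Nat.factorial (k / 7 + w) : Int))).sum

theorem fineSum_le_seven (n w : Nat) (hn : n ≤ 7) :
    fineSum n w = (n : Int) * (10 * (Nat.factorial w : Int)) := by
  induction n with
  | zero => simp [fineSum]
  | succ m ih =>
    have hm : m ≤ 7 := Nat.le_of_succ_le hn
    have hd : m / 7 = 0 := Nat.div_eq_of_lt (by omega)
    unfold fineSum at ih ⊢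
    rw [List.range_succ, List.map_append, List.sum_append, ih hm]
    simp [hd]
    ring

theorem fineSum_split (m w : Nat) :
    fineSum (7 + m) w = 7 * (10 * (Nat.factorial w : Int)) + fineSum m (w + 1) := by
  unfold fineSum
  rw [List.range_add, List.map_append, List.sum_append, List.map_map]
  have h1 : ((List.range 7).map (fun k => 10 * (Nat.factorial (k / 7 + w) : Int))).sum
      = 7 * (10 * (Nat.factorial w : Int)) := by
    have h := fineSum_le_seven 7 w (le_refl 7)
    unfold fineSum at h
    rw [h]; push_cast; ring
  rw [h1]
  congr 1
  refine congrArg (fun l => List.sum (α := Int) l) (List.map_congr_left ?_)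
  intro j _
  simp only [Function.comp]
  have h2 : (7 + j) / 7 + w = j / 7 + (w + 1) := by omega
  rw [h2]

theorem loop_eq_sum (r : Int) (w : Nat) (f : Int) :
    calculate_fine_loop r w f = f + fineSum r.toNat w := by
  by_cases h : r > 0
  · by_cases h7 : r ≤ 7
    · rw [calculate_fine_loop]
      simp only [h, dite_true]
      have hmin : min r 7 = r := min_eq_left h7
      rw [hmin]
      simp only [sub_self]
      rw [calculate_fine_loop]
      simp only [show ¬((0:Int) > 0) from by norm_num, dite_false]
      rw [fineSum_le_seven r.toNat w (by omega)]
      have : ((r.toNat : Int)) = r := Int.toNat_of_nonneg (le_of_lt h)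
      rw [this]
    · rw [calculate_fine_loop]
      simp only [h, dite_true]
      have hmin : min r 7 = 7 := min_eq_right (by omega)
      rw [hmin]
      rw [loop_eq_sum (r - 7) (w + 1) _]
      have htn : r.toNat = 7 + (r - 7).toNat := by omega
      rw [htn, fineSum_split]
      ring
  · rw [calculate_fine_loop]
    simp only [h, dite_false]
    have : r.toNat = 0 := by omega
    simp [this, fineSum]
termination_by r.toNat
decreasing_by omega

theorem fdiv_natCast (m : Nat) : PySem.Int.floordiv ((m : Int)) 7 = ((m / 7 : Nat) : Int) := by
  simp only [PySem.Int.floordiv]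
  rw [Int.fdiv_eq_ediv]
  simp only [show ((0:Int) ≤ 7 ∨ (7:Int) ∣ (m:Int)) = True from eq_true (Or.inl (by norm_num)), if_true]
  omega

theorem alt_eq_sum (n : Int) : calculate_fine_alt n = fineSum n.toNat 1 := by
  unfold calculate_fine_alt
  rw [PySem.List.pyRange_one]
  have hlen : (n + 1 - 1).toNat = n.toNat := by omega
  rw [hlen]
  induction n.toNat with
  | zero => simp [fineSum]
  | succ m ih =>
    rw [List.range_succ, List.map_append, List.foldl_append, ih]
    simp only [List.map_cons, List.map_nil, List.foldl_cons, List.foldl_nil]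
    unfold fineSum
    rw [List.range_succ, List.map_append, List.sum_append]
    simp only [List.map_cons, List.map_nil, List.sum_cons, List.sum_nil]
    have h1 : (1 + (m : Int) - 1) = (m : Int) := by ring
    rw [h1, fdiv_natCast]
    have h2 : (((m / 7 : Nat) : Int) + 1).toNat = m / 7 + 1 := by omega
    rw [h2]
    ring

-- ===== VERDICT (by name: the statement is the Claim_ definition above) =====
theorem calculate_fine_spec : Claim_equal_calculate_fine := by
  intro n _
  unfold Spec_calculate_fine calculate_fine
  rw [loop_eq_sum, alt_eq_sum]
  ring
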